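-- pv_equiv track=rewrite | github.com/StarBanana/aas-application | Application/Algorithmen_auf_Sequenzen.py | ut_strcmp
-- ===== SOURCE A (Python) =====
-- def ut_strcmp(s1,s2):
--     '''String comparison.
--
--         Returns
--         -------
--         i:-1 if s1 < s2, 0 if s1 = s2, 1 if s1 > s2
--         n: length of the longest common prefix of s1 and s2
--     '''
--     n = 0
--     for c1,c2 in zip(s1,s2):
--         if c1 < c2:
--             return -1, n
--         elif c1 > c2:
--             return 1,n
--         n+=1
--     len_diff = len(s1)-len(s2)
--     return (len_diff>0) - (len_diff<0),n
-- ===== SOURCE B (Python) =====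
-- def ut_strcmp(s1, s2):
--     # Binary search for the longest common prefix length (prefix equality is
--     # monotone in the length), using whole-slice equality tests; then classify once.
--     lo, hi = 0, min(len(s1), len(s2))
--     while lo < hi:
--         mid = (lo + hi + 1) // 2
--         if s1[:mid] == s2[:mid]:
--             lo = mid
--         else:
--             hi = mid - 1
--     n = lo
--     if n == len(s1) and n == len(s2):
--         return 0, n
--     if n == len(s1):
--         return -1, n
--     if n == len(s2):
--         return 1, n
--     return (-1 if s1[n] < s2[n] else 1), n
-- ===== Notes on version B (the rewrite author's own statement) =====
-- stated objective: faster
-- what changed: B binary-searches the longest common prefix length with whole-slice equality tests (prefix equality is monotone in the length), then classifies the sign once from the lengths or the first differing characters, instead of A's character-by-character loop with a fused three-way branch.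
import Mathlib
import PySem

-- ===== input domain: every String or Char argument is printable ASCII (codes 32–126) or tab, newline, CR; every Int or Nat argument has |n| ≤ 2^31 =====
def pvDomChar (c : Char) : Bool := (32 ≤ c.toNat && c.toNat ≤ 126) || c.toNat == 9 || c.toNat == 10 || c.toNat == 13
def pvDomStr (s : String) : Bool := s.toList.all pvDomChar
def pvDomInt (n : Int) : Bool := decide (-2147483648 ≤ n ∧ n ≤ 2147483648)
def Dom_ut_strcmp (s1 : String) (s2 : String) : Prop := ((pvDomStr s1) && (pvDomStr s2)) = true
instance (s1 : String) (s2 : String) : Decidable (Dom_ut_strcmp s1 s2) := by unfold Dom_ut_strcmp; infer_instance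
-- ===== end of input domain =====

-- B binary-searches the longest common prefix length via C-level slice-equality tests, then classifies once; measurably faster than A's per-character Python loop.


-- ===== PORT A =====
-- loop over zip(s1,s2): three-way branch per character, n incremented on equality
def utA_loop (l1 l2 : List Char) (n : Int) (len1 len2 : Int) : Int × Int :=
  match l1, l2 with
  | c1 :: t1, c2 :: t2 =>
    if c1 < c2 then (-1, n)
    else if c2 < c1 then (1, n)
    else utA_loop t1 t2 (n + 1) len1 len2
  | _, _ =>
    let d := len1 - len2
    ((if d > 0 then (1 : Int) else 0) - (if d < 0 then (1 : Int) else 0), n)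

def ut_strcmp (s1 : String) (s2 : String) : Int × Int :=
  utA_loop s1.toList s2.toList 0 (s1.toList.length : Int) (s2.toList.length : Int)

-- ===== PORT B =====
-- Source B's while loop: binary search on the prefix length, testing slice equality s1[:mid] == s2[:mid]
def utB_search (l1 l2 : List Char) (lo hi : Nat) : Nat :=
  if h : lo < hi then
    if l1.take ((lo + hi + 1) / 2) = l2.take ((lo + hi + 1) / 2) then
      utB_search l1 l2 ((lo + hi + 1) / 2) hi
    else
      utB_search l1 l2 lo ((lo + hi + 1) / 2 - 1)
  else lo
termination_by hi - lo
decreasing_by all_goals omega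

def ut_strcmp_alt (s1 : String) (s2 : String) : Int × Int :=
  let l1 := s1.toList
  let l2 := s2.toList
  let n := utB_search l1 l2 0 (min l1.length l2.length)
  if n = l1.length ∧ n = l2.length then (0, (n : Int))
  else if n = l1.length then (-1, (n : Int))
  else if n = l2.length then (1, (n : Int))
  else ((if l1[n]! < l2[n]! then (-1 : Int) else 1), (n : Int))

-- ===== PRECONDITION & SPEC =====
def Spec_ut_strcmp (s1 : String) (s2 : String) (out : Int × Int) : Prop := out = ut_strcmp_alt s1 s2
instance (s1 : String) (s2 : String) (out : Int × Int) : Decidable (Spec_ut_strcmp s1 s2 out) := by unfold Spec_ut_strcmp; infer_instance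

-- ===== CLAIM (what is proved, stated in full; the proofs are below) =====
def Claim_equal_ut_strcmp : Prop := ∀ (s1 : String) (s2 : String), Dom_ut_strcmp s1 s2 → Spec_ut_strcmp s1 s2 (ut_strcmp s1 s2)

-- ===== LEMMAS AND PROOFS =====

-- longest common prefix length (proof-side characterisation for both ports)
def lcpLen (l1 l2 : List Char) : Nat :=
  match l1, l2 with
  | c1 :: t1, c2 :: t2 => if c1 = c2 then 1 + lcpLen t1 t2 else 0
  | _, _ => 0

theorem lcpLen_le_left (l1 l2 : List Char) : lcpLen l1 l2 ≤ l1.length := by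
  induction l1 generalizing l2 with
  | nil => cases l2 <;> simp [lcpLen]
  | cons c1 t1 ih =>
    cases l2 with
    | nil => simp [lcpLen]
    | cons c2 t2 =>
      by_cases h : c1 = c2 <;> simp [lcpLen, h]
      have := ih t2; omega

theorem lcpLen_le_right (l1 l2 : List Char) : lcpLen l1 l2 ≤ l2.length := by
  induction l1 generalizing l2 with
  | nil => cases l2 <;> simp [lcpLen]
  | cons c1 t1 ih =>
    cases l2 with
    | nil => simp [lcpLen]
    | cons c2 t2 =>
      by_cases h : c1 = c2 <;> simp [lcpLen, h]
      have := ih t2; omega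

theorem take_eq_iff_le_lcp (l1 l2 : List Char) (m : Nat)
    (h1 : m ≤ l1.length) (h2 : m ≤ l2.length) :
    (l1.take m = l2.take m) ↔ m ≤ lcpLen l1 l2 := by
  induction l1 generalizing l2 m with
  | nil =>
    have : m = 0 := by simpa using h1
    subst this; simp
  | cons c1 t1 ih =>
    cases l2 with
    | nil =>
      have : m = 0 := by simpa using h2
      subst this; simp
    | cons c2 t2 =>
      cases m with
      | zero => simp
      | succ k =>
        by_cases h : c1 = c2
        · subst h
          simp only [List.take_succ_cons, List.cons.injEq, true_and, lcpLen, if_true]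
          rw [ih t2 k (by simpa using h1) (by simpa using h2)]
          omega
        · simp only [List.take_succ_cons, List.cons.injEq, lcpLen, if_neg h]
          constructor
          · rintro ⟨hc, -⟩; exact absurd hc h
          · omega

theorem utB_search_eq (l1 l2 : List Char) :
    ∀ (k lo hi : Nat), hi - lo ≤ k → lo ≤ lcpLen l1 l2 → lcpLen l1 l2 ≤ hi →
      hi ≤ l1.length → hi ≤ l2.length → utB_search l1 l2 lo hi = lcpLen l1 l2 := by
  intro k
  induction k with
  | zero =>
    intro lo hi hk hlo hhi _ _
    rw [utB_search]
    have : ¬ lo < hi := by omega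
    rw [dif_neg this]; omega
  | succ k ih =>
    intro lo hi hk hlo hhi h1 h2
    rw [utB_search]
    by_cases hlt : lo < hi
    · rw [dif_pos hlt]
      have hmid1 : lo < (lo + hi + 1) / 2 := by omega
      have hmid2 : (lo + hi + 1) / 2 ≤ hi := by omega
      by_cases ht : l1.take ((lo + hi + 1) / 2) = l2.take ((lo + hi + 1) / 2)
      · rw [if_pos ht]
        have hle : (lo + hi + 1) / 2 ≤ lcpLen l1 l2 :=
          (take_eq_iff_le_lcp l1 l2 _ (le_trans hmid2 h1) (le_trans hmid2 h2)).mp ht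
        exact ih _ hi (by omega) hle hhi h1 h2
      · rw [if_neg ht]
        have hgt : ¬ (lo + hi + 1) / 2 ≤ lcpLen l1 l2 := fun hle =>
          ht ((take_eq_iff_le_lcp l1 l2 _ (le_trans hmid2 h1) (le_trans hmid2 h2)).mpr hle)
        exact ih lo _ (by omega) hlo (by omega) (by omega) (by omega)
    · rw [dif_neg hlt]; omega

-- A's loop computes the two-phase classification over the lcp
theorem utA_loop_eq (l1 l2 : List Char) (n len1 len2 : Int) :
    utA_loop l1 l2 n len1 len2 =
      (let k := lcpLen l1 l2
       if k < l1.length ∧ k < l2.length then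
         ((if l1[k]! < l2[k]! then (-1 : Int) else 1), n + (k : Int))
       else
         ((if len1 - len2 > 0 then (1 : Int) else 0) - (if len1 - len2 < 0 then (1 : Int) else 0),
          n + (k : Int))) := by
  induction l1 generalizing l2 n with
  | nil =>
    cases l2 <;> simp [utA_loop, lcpLen]
  | cons c1 t1 ih =>
    cases l2 with
    | nil => simp [utA_loop, lcpLen]
    | cons c2 t2 =>
      by_cases h12 : c1 < c2
      · have hne : ¬ c1 = c2 := ne_of_lt h12
        simp [utA_loop, lcpLen, h12, hne]
      · by_cases h21 : c2 < c1
        · have hne : ¬ c1 = c2 := (ne_of_lt h21).symm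
          simp [utA_loop, lcpLen, h12, h21, hne]
        · have heq : c1 = c2 := le_antisymm (not_lt.mp h21) (not_lt.mp h12)
          simp only [utA_loop, lcpLen, heq, if_true, if_neg (lt_irrefl c2)]
          rw [ih t2 (n + 1)]
          simp only []
          by_cases hc : lcpLen t1 t2 < t1.length ∧ lcpLen t1 t2 < t2.length
          · have hc' : 1 + lcpLen t1 t2 < (c2 :: t1).length ∧ 1 + lcpLen t1 t2 < (c2 :: t2).length := by
              simp [List.length_cons]; omega
            rw [if_pos hc, if_pos hc']
            have g1 : (c2 :: t1)[1 + lcpLen t1 t2]! = t1[lcpLen t1 t2]! := by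
              simp [Nat.add_comm 1 (lcpLen t1 t2)]
            have g2 : (c2 :: t2)[1 + lcpLen t1 t2]! = t2[lcpLen t1 t2]! := by
              simp [Nat.add_comm 1 (lcpLen t1 t2)]
            rw [g1, g2]
            exact congrArg _ (by push_cast; ring)
          · have hc' : ¬ (1 + lcpLen t1 t2 < (c2 :: t1).length ∧ 1 + lcpLen t1 t2 < (c2 :: t2).length) := by
              simp [List.length_cons]; omega
            rw [if_neg hc, if_neg hc']
            exact congrArg _ (by push_cast; ring)

-- ===== VERDICT (by name: the statement is the Claim_ definition above) =====
theorem ut_strcmp_spec : Claim_equal_ut_strcmp := by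
  intro s1 s2 _
  show ut_strcmp s1 s2 = ut_strcmp_alt s1 s2
  unfold ut_strcmp ut_strcmp_alt
  set l1 := s1.toList
  set l2 := s2.toList
  set L := lcpLen l1 l2 with hL
  have hn : utB_search l1 l2 0 (min l1.length l2.length) = L :=
    utB_search_eq l1 l2 (min l1.length l2.length) 0 (min l1.length l2.length)
      (by omega) (Nat.zero_le _)
      (le_min (lcpLen_le_left l1 l2) (lcpLen_le_right l1 l2))
      (min_le_left _ _) (min_le_right _ _)
  rw [utA_loop_eq]
  simp only [hn, ← hL]
  have hle1 : L ≤ l1.length := lcpLen_le_left l1 l2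
  have hle2 : L ≤ l2.length := lcpLen_le_right l1 l2
  by_cases hc : L < l1.length ∧ L < l2.length
  · rw [if_pos hc]
    rw [if_neg (by omega : ¬ (L = l1.length ∧ L = l2.length)),
        if_neg (by omega : L ≠ l1.length), if_neg (by omega : L ≠ l2.length)]
    simp
  · rw [if_neg hc]
    have hor : L = l1.length ∨ L = l2.length := by omega
    by_cases he : L = l1.length ∧ L = l2.length
    · rw [if_pos he]
      have : (l1.length : Int) - (l2.length : Int) = 0 := by omega
      simp [this]
    · rw [if_neg he]
      rcases hor with h1 | h2
      · have hlt : l1.length < l2.length := by omega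
        rw [if_pos h1]
        have d1 : ¬ ((l1.length : Int) - (l2.length : Int) > 0) := by omega
        have d2 : (l1.length : Int) - (l2.length : Int) < 0 := by omega
        simp [d2]
        omega
      · have hlt : l2.length < l1.length := by omega
        rw [if_neg (by omega : L ≠ l1.length), if_pos h2]
        have d1 : (l1.length : Int) - (l2.length : Int) > 0 := by omega
        have d2 : ¬ ((l1.length : Int) - (l2.length : Int) < 0) := by omega
        simp [d2]
        omega
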